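-- pv_equiv track=rewrite | github.com/aldo-git-bit/predicting-tashlhiyt-plural | scripts/ngram_feature_selection/ngram_extractor.py | extract_initial_ngrams
-- ===== SOURCE A (Python) =====
-- def extract_initial_ngrams(phonemes, max_n=3):
--     """
--     Extract initial n-grams from a phoneme list.
--
--     Args:
--         phonemes (list): List of phonemes (e.g., ['k', 'r', 'a', 't'])
--         max_n (int): Maximum n-gram size (default: 3)
--
--     Returns:
--         list: Initial n-grams with ^ marker (e.g., ['^k', '^kr', '^kra'])
--
--     Examples:
--         >>> extract_initial_ngrams(['k', 'r', 'a', 't'])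
--         ['^k', '^kr', '^kra']
--
--         >>> extract_initial_ngrams(['a', 'f', 'u', 's'])
--         ['^a', '^af', '^afu']
--     """
--     if not phonemes:
--         return []
--
--     ngrams = []
--     for n in range(1, min(max_n + 1, len(phonemes) + 1)):
--         ngram = ''.join(phonemes[:n])
--         ngrams.append(f'^{ngram}')
--
--     return ngrams
-- ===== SOURCE B (Python) =====
-- def extract_initial_ngrams(phonemes, max_n=3):
--     """Single pass keeping one growing prefix string instead of re-slicing and re-joining per n."""
--     ngrams = []
--     acc = '^'
--     i = 0
--     for p in phonemes:
--         if i >= max_n: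
--             break
--         acc += p
--         ngrams.append(acc)
--         i += 1
--     return ngrams
-- ===== Notes on version B (the rewrite author's own statement) =====
-- stated objective: alternative
-- what changed: Replaces the per-n re-slice-and-rejoin of the prefix over a range() loop with a single pass over the phoneme list that maintains one growing prefix string.
import Mathlib
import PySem

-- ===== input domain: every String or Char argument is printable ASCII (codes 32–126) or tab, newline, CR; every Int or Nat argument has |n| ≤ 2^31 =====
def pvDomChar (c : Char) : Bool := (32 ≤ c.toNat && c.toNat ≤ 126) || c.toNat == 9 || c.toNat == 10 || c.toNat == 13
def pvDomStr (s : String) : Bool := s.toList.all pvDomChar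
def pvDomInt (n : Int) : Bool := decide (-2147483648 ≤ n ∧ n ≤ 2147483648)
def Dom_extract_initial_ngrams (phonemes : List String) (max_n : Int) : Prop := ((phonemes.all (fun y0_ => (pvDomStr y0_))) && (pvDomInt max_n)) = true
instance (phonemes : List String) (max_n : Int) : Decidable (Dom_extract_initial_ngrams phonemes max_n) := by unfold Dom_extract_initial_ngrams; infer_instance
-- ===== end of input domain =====

-- B replaces A's per-n re-slice-and-rejoin over a range() with a single pass that keeps one growing prefix string.


-- ===== PORT A =====
def extract_initial_ngrams (phonemes : List String) (max_n : Int) : List String :=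
  if phonemes = [] then []
  else
    (PySem.List.pyRange 1 (min (max_n + 1) ((phonemes.length : Int) + 1)) 1).foldl
      (fun ngrams n =>
        let ngram := PySem.Str.join "" (PySem.List.slice phonemes none (some n))
        ngrams ++ ["^" ++ ngram]) []

-- ===== PORT B =====
-- loop body of Source B: walk the list once, growing `acc` and counting with `i`; break when i ≥ max_n
def extractLoop (max_n : Int) : List String → Int → String → List String
  | [], _, _ => []
  | p :: rest, i, acc =>
    if max_n ≤ i then []
    else
      let acc' := acc ++ p
      acc' :: extractLoop max_n rest (i + 1) acc'

def extract_initial_ngrams_alt (phonemes : List String) (max_n : Int) : List String :=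
  extractLoop max_n phonemes 0 "^"

-- ===== PRECONDITION & SPEC =====
def Spec_extract_initial_ngrams (phonemes : List String) (max_n : Int) (out : List String) : Prop := out = extract_initial_ngrams_alt phonemes max_n
instance (phonemes : List String) (max_n : Int) (out : List String) : Decidable (Spec_extract_initial_ngrams phonemes max_n out) := by unfold Spec_extract_initial_ngrams; infer_instance

-- ===== CLAIM (what is proved, stated in full; the proofs are below) =====
def Claim_equal_extract_initial_ngrams : Prop := ∀ (phonemes : List String) (max_n : Int), Dom_extract_initial_ngrams phonemes max_n → Spec_extract_initial_ngrams phonemes max_n (extract_initial_ngrams phonemes max_n)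

-- ===== LEMMAS AND PROOFS =====

lemma str_join_empty_cons (p : String) (l : List String) :
    PySem.Str.join "" (p :: l) = p ++ PySem.Str.join "" l := by
  apply String.toList_inj.mp
  cases l with
  | nil => simp [PySem.Chars.join_singleton, PySem.Chars.join_nil]
  | cons q r => simp [PySem.Chars.join_cons_cons]

lemma str_join_empty_nil : PySem.Str.join "" ([] : List String) = "" := by
  apply String.toList_inj.mp
  simp [PySem.Chars.join_nil]

-- common normal form of both programs' results
def ngramSpec (phonemes : List String) (m : Nat) : List String :=
  (List.range m).map (fun k => "^" ++ PySem.Str.join "" (phonemes.take (k + 1)))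

lemma extractLoop_eq (max_n : Int) (ps : List String) :
    ∀ (i : Int) (acc : String),
      extractLoop max_n ps i acc =
        (List.range (min (max_n - i) (ps.length : Int)).toNat).map
          (fun k => acc ++ PySem.Str.join "" (ps.take (k + 1))) := by
  induction ps with
  | nil =>
    intro i acc
    simp [extractLoop]
  | cons p rest ih =>
    intro i acc
    by_cases hb : max_n ≤ i
    · simp [extractLoop, hb]

    · have hm : (min (max_n - i) (((p :: rest).length : Int))).toNat
          = (min (max_n - (i + 1)) ((rest.length : Int))).toNat + 1 := by
        simp; omega
      rw [hm]
      simp only [extractLoop, if_neg hb, List.range_succ_eq_map, List.map_cons, List.map_map]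
      congr 1
      · rw [List.take_succ_cons, List.take_zero, str_join_empty_cons]
        simp [str_join_empty_nil]
      · rw [ih (i + 1) (acc ++ p)]
        apply List.map_congr_left
        intro k _
        simp only [Function.comp]
        rw [List.take_succ_cons, str_join_empty_cons, String.append_assoc]

lemma a_eq (phonemes : List String) (max_n : Int) :
    extract_initial_ngrams phonemes max_n =
      ngramSpec phonemes (min max_n (phonemes.length : Int)).toNat := by
  unfold extract_initial_ngrams ngramSpec
  by_cases h : phonemes = []
  · subst h; simp
  · rw [if_neg h, PySem.List.pyRange_one, List.foldl_map,
        PySem.List.foldl_append_singleton_eq_map]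
    have hM : (min (max_n + 1) ((phonemes.length : Int) + 1) - 1).toNat
        = (min max_n ((phonemes.length : Int))).toNat := by omega
    rw [hM]
    apply List.map_congr_left
    intro k _
    have h1 : ((1 : Int) + k) = ((k + 1 : Nat) : Int) := by push_cast; ring
    rw [h1, PySem.List.slice_to_natCast]

-- ===== VERDICT (by name: the statement is the Claim_ definition above) =====
theorem extract_initial_ngrams_spec : Claim_equal_extract_initial_ngrams := by
  intro phonemes max_n _
  unfold Spec_extract_initial_ngrams extract_initial_ngrams_alt
  rw [a_eq, extractLoop_eq]
  simp [ngramSpec]
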